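-- pv_equiv track=rewrite | github.com/dsweet99/dryer | test/benchmark_data/module_009.py | compute_9_6
-- ===== SOURCE A (Python) =====
-- def compute_9_6(a, b, c):
--     x = a * 172 + b * 161
--     y = c * 132 - a * 133
--     for i in range(20):
--         x = x + i * 34
--         y = y - i * 22
--         if x > 5960:
--             x = x % 1480
--     return x + y + 55
-- ===== SOURCE B (Python) =====
-- # B: segment-jump algorithm. y is independent of x, so it collapses to the
-- # closed form c*132 - a*133 - 4180 (22*sum(range(20)) = 4180). For x, note that
-- # between wraps x grows by fixed prefix-sum increments, so instead of stepping
-- # every i we precompute prefix sums _P of the increments i*34 and jump directly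
-- # from one wrap event to the next: find the first step where the unwrapped value
-- # exceeds 5960, apply the % 1480 wrap there, and continue from that step.
-- _P = [0]
-- for _i in range(20):
--     _P.append(_P[-1] + _i * 34)
--
--
-- def _next_wrap(base, start):
--     # first i in [start, 20) where the (wrap-free) value after step i exceeds 5960
--     for i in range(start, 20):
--         if base + _P[i + 1] - _P[start] > 5960:
--             return i
--     return None
--
--
-- def compute_9_6(a, b, c):
--     base = a * 172 + b * 161
--     start = 0
--     while start < 20:
--         i = _next_wrap(base, start)
--         if i is None:
--             base += _P[20] - _P[start]
--             break
--         base = (base + _P[i + 1] - _P[start]) % 1480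
--         start = i + 1
--     return base + (c * 132 - a * 133 - 4180) + 55
-- ===== Notes on version B (the rewrite author's own statement) =====
-- stated objective: alternative
-- what changed: Instead of A's 20 uniform loop iterations over two accumulators, B precomputes the prefix sums of the i*34 increments, jumps directly from one modulo-wrap event of x to the next (scanning prefix sums for the first step exceeding 5960, wrapping there, and continuing), and replaces the independent y stream by the closed form c*132 - a*133 - 4180.
import Mathlib
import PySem

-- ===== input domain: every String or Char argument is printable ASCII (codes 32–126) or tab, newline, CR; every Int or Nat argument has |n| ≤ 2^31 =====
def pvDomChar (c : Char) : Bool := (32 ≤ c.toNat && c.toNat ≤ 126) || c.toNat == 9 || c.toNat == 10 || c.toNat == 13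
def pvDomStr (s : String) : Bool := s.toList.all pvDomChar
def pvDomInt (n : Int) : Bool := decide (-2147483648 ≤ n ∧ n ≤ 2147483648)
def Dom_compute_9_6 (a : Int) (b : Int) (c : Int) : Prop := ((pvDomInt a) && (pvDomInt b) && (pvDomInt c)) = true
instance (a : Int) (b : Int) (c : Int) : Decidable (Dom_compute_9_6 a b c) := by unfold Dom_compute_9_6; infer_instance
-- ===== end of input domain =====

-- B replaces A's 20 uniform iterations by a segment-jump algorithm over precomputed
-- prefix sums (jump straight from one modulo-wrap event to the next) and collapses the
-- independent y stream to the closed form c*132 - a*133 - 4180. Objective: alternative.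

-- ===== PORT A =====
def compute_9_6 (a : Int) (b : Int) (c : Int) : Int :=
  let x : Int := a * 172 + b * 161
  let y : Int := c * 132 - a * 133
  let p := (PySem.List.pyRange 0 20 1).foldl
    (fun (p : Int × Int) i =>
      let x := p.1 + i * 34
      let y := p.2 - i * 22
      let x := if x > 5960 then PySem.Int.mod x 1480 else x
      (x, y)) (x, y)
  p.1 + p.2 + 55

-- ===== PORT B =====
-- _P from Source B: prefP n = _P[n], the prefix sums of the increments i*34
def prefP : Nat → Int
  | 0 => 0
  | n + 1 => prefP n + (n : Int) * 34

-- _next_wrap from Source B: first i in [i0, 20) whose wrap-free value exceeds 5960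
-- (the fuel argument only makes the Python for-loop structurally recursive)
def nextWrap (base : Int) (s : Nat) : Nat → Nat → Option Nat
  | 0, _ => none
  | fuel + 1, i =>
    if i < 20 then
      if base + prefP (i + 1) - prefP s > 5960 then some i
      else nextWrap base s fuel (i + 1)
    else none

-- the while-loop of Source B; fuel bounds the number of wrap segments (≤ 20)
def segLoop : Nat → Int → Nat → Int
  | 0, base, _ => base
  | fuel + 1, base, s =>
    if s < 20 then
      match nextWrap base s 20 s with
      | none => base + prefP 20 - prefP s
      | some i => segLoop fuel (PySem.Int.mod (base + prefP (i + 1) - prefP s) 1480) (i + 1)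
    else base

def compute_9_6_alt (a : Int) (b : Int) (c : Int) : Int :=
  segLoop 20 (a * 172 + b * 161) 0 + (c * 132 - a * 133 - 4180) + 55

-- ===== PRECONDITION & SPEC =====
def Spec_compute_9_6 (a : Int) (b : Int) (c : Int) (out : Int) : Prop := out = compute_9_6_alt a b c
instance (a : Int) (b : Int) (c : Int) (out : Int) : Decidable (Spec_compute_9_6 a b c out) := by unfold Spec_compute_9_6; infer_instance

-- ===== CLAIM (what is proved, stated in full; the proofs are below) =====
def Claim_equal_compute_9_6 : Prop := ∀ (a : Int) (b : Int) (c : Int), Dom_compute_9_6 a b c → Spec_compute_9_6 a b c (compute_9_6 a b c)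

-- ===== LEMMAS AND PROOFS =====

-- A's x-step, isolated for the proofs
def stepA (x i : Int) : Int :=
  let x := x + i * 34
  if x > 5960 then PySem.Int.mod x 1480 else x

-- A's paired fold = (the x-only fold, y minus 22 times the sum of the indices)
theorem foldA_decompose (l : List Int) (x y : Int) :
    l.foldl (fun (p : Int × Int) i =>
      let x := p.1 + i * 34
      let y := p.2 - i * 22
      let x := if x > 5960 then PySem.Int.mod x 1480 else x
      (x, y)) (x, y)
    = (l.foldl stepA x, y - 22 * l.sum) := by
  induction l generalizing x y with
  | nil => simp
  | cons h t ih =>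
      simp only [List.foldl_cons, List.sum_cons, ih, stepA]
      ring_nf

theorem nextWrap_none (base : Int) (s : Nat) :
    ∀ (fuel i : Nat), 20 ≤ i + fuel → nextWrap base s fuel i = none →
      ∀ j, i ≤ j → j < 20 → base + prefP (j + 1) - prefP s ≤ 5960 := by
  intro fuel
  induction fuel with
  | zero => intro i hi _ j h1 h2; omega
  | succ f ih =>
      intro i hi h j h1 h2
      simp only [nextWrap] at h
      by_cases hi20 : i < 20
      · simp only [if_pos hi20] at h
        by_cases hc : base + prefP (i + 1) - prefP s > 5960
        · simp [hc] at h
        · simp only [if_neg hc] at h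
          rcases Nat.eq_or_lt_of_le h1 with rfl | hlt
          · omega
          · exact ih (i + 1) (by omega) h j hlt h2
      · omega

theorem nextWrap_some (base : Int) (s : Nat) :
    ∀ (fuel i k : Nat), nextWrap base s fuel i = some k →
      i ≤ k ∧ k < 20 ∧ base + prefP (k + 1) - prefP s > 5960 ∧
        ∀ j, i ≤ j → j < k → base + prefP (j + 1) - prefP s ≤ 5960 := by
  intro fuel
  induction fuel with
  | zero => intro i k h; simp [nextWrap] at h
  | succ f ih =>
      intro i k h
      simp only [nextWrap] at h
      by_cases hi20 : i < 20
      · simp only [if_pos hi20] at h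
        by_cases hc : base + prefP (i + 1) - prefP s > 5960
        · simp only [if_pos hc, Option.some.injEq] at h
          subst h
          exact ⟨le_refl _, hi20, hc, fun j h1 h2 => by omega⟩
        · simp only [if_neg hc] at h
          obtain ⟨h1, h2, h3, h4⟩ := ih (i + 1) k h
          refine ⟨by omega, h2, h3, fun j hj1 hj2 => ?_⟩
          rcases Nat.eq_or_lt_of_le hj1 with rfl | hlt
          · exact le_of_not_gt hc
          · exact h4 j hlt hj2
      · simp [hi20] at h

theorem prefP_succ (n : Nat) : prefP (n + 1) = prefP n + (n : Int) * 34 := rfl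

-- a wrap-free segment of A's fold is just the prefix-sum difference
theorem foldNoWrap :
    ∀ (d s : Nat) (base : Int),
      (∀ j, s ≤ j → j < s + d → base + prefP (j + 1) - prefP s ≤ 5960) →
      (PySem.List.pyRange (s : Int) ((s + d : Nat) : Int) 1).foldl stepA base
        = base + prefP (s + d) - prefP s := by
  intro d
  induction d with
  | zero => intro s base _; rw [PySem.List.pyRange_one_eq_nil (by omega)]; simp
  | succ d ih =>
      intro s base h
      rw [PySem.List.pyRange_one_cons (by push_cast; omega)]
      simp only [List.foldl_cons]
      have hs : base + prefP (s + 1) - prefP s ≤ 5960 := h s (le_refl _) (by omega)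
      have hx : stepA base (s : Int) = base + prefP (s + 1) - prefP s := by
        simp only [stepA, prefP_succ]
        rw [if_neg (by rw [prefP_succ] at hs; linarith)]
        ring
      rw [hx]
      have hcast : ((s : Int) + 1) = ((s + 1 : Nat) : Int) := by push_cast; ring
      have hcast2 : ((s + (d + 1) : Nat) : Int) = (((s + 1) + d : Nat) : Int) := by push_cast; ring
      rw [hcast, hcast2, ih (s + 1) (base + prefP (s + 1) - prefP s)
        (fun j h1 h2 => by have := h j (by omega) (by omega); omega)]
      have : s + (d + 1) = (s + 1) + d := by omega
      rw [this]
      ring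

theorem segLoop_eq :
    ∀ (fuel s : Nat) (base : Int), s ≤ 20 → 20 - s ≤ fuel →
      segLoop fuel base s = (PySem.List.pyRange (s : Int) 20 1).foldl stepA base := by
  intro fuel
  induction fuel with
  | zero =>
      intro s base h1 h2
      have : s = 20 := by omega
      subst this
      rw [PySem.List.pyRange_one_eq_nil (by norm_num)]
      rfl
  | succ f ih =>
      intro s base h1 h2
      simp only [segLoop]
      by_cases hs : s < 20
      · rw [if_pos hs]
        cases hnw : nextWrap base s 20 s with
        | none =>
            have hall := nextWrap_none base s 20 s (by omega) hnw
            have h20 : ((20 : Int)) = ((s + (20 - s) : Nat) : Int) := by push_cast; omega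
            rw [h20, foldNoWrap (20 - s) s base (fun j hj1 hj2 => hall j hj1 (by omega))]
            have : s + (20 - s) = 20 := by omega
            rw [this]
        | some k =>
            obtain ⟨hk1, hk2, hk3, hk4⟩ := nextWrap_some base s 20 s k hnw
            -- split the remaining range at k+1
            rw [show (PySem.List.pyRange (s : Int) 20 1)
                  = PySem.List.pyRange (s : Int) ((k + 1 : Nat) : Int) 1
                    ++ PySem.List.pyRange ((k + 1 : Nat) : Int) 20 1 from
              PySem.List.pyRange_one_append _ _ _ (by push_cast; omega) (by push_cast; omega)]
            rw [List.foldl_append]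
            -- the first segment: wrap-free up to k, then the wrap at k
            have hsplit : (PySem.List.pyRange (s : Int) ((k + 1 : Nat) : Int) 1)
                = PySem.List.pyRange (s : Int) ((s + (k - s) : Nat) : Int) 1 ++ [(k : Int)] := by
              have : ((k + 1 : Nat) : Int) = ((k : Nat) : Int) + 1 := by push_cast; ring
              rw [this, PySem.List.pyRange_one_succ_right (by omega)]
              congr 2
              push_cast; omega
            rw [hsplit, List.foldl_append,
              foldNoWrap (k - s) s base (fun j hj1 hj2 => hk4 j hj1 (by omega))]
            have hks : s + (k - s) = k := by omega
            rw [hks]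
            simp only [List.foldl_cons, List.foldl_nil]
            have hstep : stepA (base + prefP k - prefP s) (k : Int)
                = PySem.Int.mod (base + prefP (k + 1) - prefP s) 1480 := by
              simp only [stepA, prefP_succ]
              rw [if_pos (by rw [prefP_succ] at hk3; linarith)]
              congr 1
              ring
            rw [hstep, ih (k + 1) _ (by omega) (by omega)]
      · rw [if_neg hs]
        have : s = 20 := by omega
        subst this
        rw [PySem.List.pyRange_one_eq_nil (by norm_num)]
        rfl

-- ===== VERDICT (by name: the statement is the Claim_ definition above) =====
theorem compute_9_6_spec : Claim_equal_compute_9_6 := by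
  intro a b c _
  show compute_9_6 a b c = compute_9_6_alt a b c
  simp only [compute_9_6, compute_9_6_alt, foldA_decompose]
  rw [segLoop_eq 20 0 (a * 172 + b * 161) (by omega) (by omega)]
  have hs : (PySem.List.pyRange 0 20 1).sum = 190 := by decide
  rw [hs]
  have : ((0 : Nat) : Int) = 0 := rfl
  rw [this]
  ring
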